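-- pv_equiv track=rewrite | github.com/julianwileymac/agentic_quant_platform | aqp/api/routes/sources.py | _encode_env_value
-- ===== SOURCE A (Python) =====
-- def _encode_env_value(value: str) -> str:
--     raw = str(value)
--     if raw == "":
--         return ""
--     needs_quotes = any(ch.isspace() for ch in raw) or "#" in raw or '"' in raw
--     if not needs_quotes:
--         return raw
--     escaped = raw.replace("\\", "\\\\").replace('"', '\\"')
--     return f'"{escaped}"'
-- ===== SOURCE B (Python) =====
-- def _encode_env_value(value: str) -> str:
--     raw = str(value)
--     out = []
--     needs_quotes = False
--     for ch in raw:
--         if ch == "\\":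
--             out.append("\\\\")
--         elif ch == '"':
--             out.append('\\"')
--             needs_quotes = True
--         else:
--             out.append(ch)
--             if ch.isspace() or ch == "#":
--                 needs_quotes = True
--     if not raw:
--         return ""
--     if not needs_quotes:
--         return raw
--     return '"' + "".join(out) + '"'
-- ===== Notes on version B (the rewrite author's own statement) =====
-- stated objective: alternative
-- what changed: Replaces A's separate any()-whitespace scan, two substring membership tests and two chained .replace() passes with a single pass over the characters that simultaneously builds the escaped buffer and the needs-quotes flag.
import Mathlib
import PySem

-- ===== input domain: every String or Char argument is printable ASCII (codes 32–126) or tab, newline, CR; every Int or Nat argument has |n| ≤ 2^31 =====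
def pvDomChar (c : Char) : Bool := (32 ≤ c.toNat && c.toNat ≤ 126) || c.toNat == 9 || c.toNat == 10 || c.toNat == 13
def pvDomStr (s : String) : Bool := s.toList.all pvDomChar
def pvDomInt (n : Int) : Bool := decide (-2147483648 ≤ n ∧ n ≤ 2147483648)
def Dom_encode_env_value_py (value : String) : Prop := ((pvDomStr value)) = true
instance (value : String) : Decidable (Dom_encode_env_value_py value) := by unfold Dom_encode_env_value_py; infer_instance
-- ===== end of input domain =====

-- B replaces A's separate any()-scan, two substring tests and two .replace() passes by one
-- character pass that builds the escaped buffer and the needs-quotes flag together (objective: alternative).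

-- ===== PORT A =====
def encode_env_value_py (value : String) : String :=
  let raw := value.toList
  if raw = [] then ""
  else
    let needs_quotes := raw.any PySem.Chars.isspace || PySem.Chars.isIn ['#'] raw || PySem.Chars.isIn ['"'] raw
    if needs_quotes = false then value
    else
      let escaped := PySem.Chars.replace (PySem.Chars.replace raw ['\\'] ['\\', '\\']) ['"'] ['\\', '"']
      String.mk ('"' :: escaped ++ ['"'])

-- ===== PORT B =====
-- one step of Source B's loop: state = (escaped buffer so far, needs_quotes flag)
def pvEscStep (st : List Char × Bool) (ch : Char) : List Char × Bool :=
  if ch = '\\' then (st.1 ++ ['\\', '\\'], st.2)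
  else if ch = '"' then (st.1 ++ ['\\', '"'], true)
  else (st.1 ++ [ch], st.2 || (PySem.Chars.isspace ch || ch = '#'))

def encode_env_value_py_alt (value : String) : String :=
  let raw := value.toList
  let st := raw.foldl pvEscStep ([], false)
  if raw = [] then ""
  else if st.2 = false then value
  else String.mk ('"' :: st.1 ++ ['"'])

-- ===== PRECONDITION & SPEC =====
def Spec_encode_env_value_py (value : String) (out : String) : Prop := out = encode_env_value_py_alt value
instance (value : String) (out : String) : Decidable (Spec_encode_env_value_py value out) := by unfold Spec_encode_env_value_py; infer_instance

-- ===== CLAIM (what is proved, stated in full; the proofs are below) =====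
def Claim_equal_encode_env_value_py : Prop := ∀ (value : String), Dom_encode_env_value_py value → Spec_encode_env_value_py value (encode_env_value_py value)

-- ===== LEMMAS AND PROOFS =====

-- per-char escape and needs-quotes predicate used to characterise both programs
def pvEsc (c : Char) : List Char :=
  if c = '\\' then ['\\', '\\'] else if c = '"' then ['\\', '"'] else [c]

def pvNQ (c : Char) : Bool := PySem.Chars.isspace c || c = '#' || c = '"'

theorem pvEscStep_foldl (l : List Char) (acc : List Char) (b : Bool) :
    l.foldl pvEscStep (acc, b) = (acc ++ l.flatMap pvEsc, b || l.any pvNQ) := by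
  induction l generalizing acc b with
  | nil => simp
  | cons c t ih =>
    by_cases h1 : c = '\\'
    · subst h1
      simp [pvEscStep, ih, pvEsc, pvNQ, PySem.Chars.isspace]
    · by_cases h2 : c = '"'
      · subst h2
        simp [pvEscStep, ih, pvEsc, pvNQ, h1]
      · simp [pvEscStep, ih, pvEsc, pvNQ, h1, h2, Bool.or_comm, Bool.or_left_comm]

theorem pvReplace_go_single (o : Char) (new : List Char) (l acc : List Char) (fuel : Nat)
    (h : l.length ≤ fuel) :
    PySem.Chars.replace.go [o] new fuel l acc
      = acc.reverse ++ l.flatMap (fun c => if c = o then new else [c]) := by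
  induction l generalizing fuel acc with
  | nil => cases fuel <;> simp [PySem.Chars.replace.go]
  | cons c t ih =>
    cases fuel with
    | zero => simp at h
    | succ f =>
      simp only [PySem.Chars.replace.go]
      by_cases hc : c = o
      · subst hc
        rw [show ([c].isPrefixOf (c :: t)) = true by simp [List.isPrefixOf]]
        simp only [if_true, List.length_cons, List.length_nil, List.drop_succ_cons,
          List.drop_zero]
        rw [ih (new.reverse ++ acc) f (by simp at h; omega)]
        simp
      · have hp : ([o].isPrefixOf (c :: t)) = false := by
          simp [List.isPrefixOf, BEq.beq]
          intro hh; exact absurd hh.symm hc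
        rw [hp]
        simp only [if_false, Bool.false_eq_true]
        rw [ih (c :: acc) f (by simp at h; omega)]
        simp [hc]

theorem pvReplace_single (l : List Char) (o : Char) (new : List Char) :
    PySem.Chars.replace l [o] new = l.flatMap (fun c => if c = o then new else [c]) := by
  simp [PySem.Chars.replace, pvReplace_go_single o new l [] l.length (le_refl _)]

theorem pvIsIn_singleton (a : Char) (s : List Char) :
    PySem.Chars.isIn [a] s = s.any (fun c => c = a) := by
  by_cases h : a ∈ s
  · rw [show PySem.Chars.isIn [a] s = true from (PySem.Chars.isIn_iff_infix _ _).2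
      ((List.singleton_infix_iff a s).2 h)]
    symm; rw [List.any_eq_true]
    exact ⟨a, h, by simp⟩
  · rw [show PySem.Chars.isIn [a] s = false from (PySem.Chars.isIn_eq_false_iff _ _).2
      (fun hinf => h ((List.singleton_infix_iff a s).1 hinf))]
    symm; rw [List.any_eq_false]
    intro x hx
    simp only [decide_eq_true_eq]
    intro hxa; exact h (hxa ▸ hx)

theorem pvAny_merge (l : List Char) :
    (l.any PySem.Chars.isspace || PySem.Chars.isIn ['#'] l || PySem.Chars.isIn ['"'] l)
      = l.any pvNQ := by
  rw [pvIsIn_singleton, pvIsIn_singleton]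
  induction l with
  | nil => simp
  | cons c t ih =>
    simp only [List.any_cons, pvNQ] at *
    rw [← ih]
    cases PySem.Chars.isspace c <;> cases t.any PySem.Chars.isspace <;>
      by_cases h1 : c = '#' <;> by_cases h2 : c = '"' <;> simp [h1, h2]

theorem pvEsc_compose (l : List Char) :
    (l.flatMap (fun c => if c = '\\' then ['\\', '\\'] else [c])).flatMap
        (fun c => if c = '"' then ['\\', '"'] else [c])
      = l.flatMap pvEsc := by
  rw [List.flatMap_assoc]
  apply List.flatMap_congr
  intro c _
  by_cases h1 : c = '\\'
  · subst h1; simp [pvEsc]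
  · by_cases h2 : c = '"'
    · subst h2; simp [pvEsc, h1]
    · simp [h1, h2, pvEsc]

-- ===== VERDICT (by name: the statement is the Claim_ definition above) =====
theorem encode_env_value_py_spec : Claim_equal_encode_env_value_py := by
  intro value _
  unfold Spec_encode_env_value_py encode_env_value_py encode_env_value_py_alt
  simp only [pvEscStep_foldl, List.nil_append, Bool.false_or]
  by_cases hnil : value.toList = []
  · simp [hnil]
  · simp only [hnil, ite_false]
    rw [← pvAny_merge]
    by_cases hq : (value.toList.any PySem.Chars.isspace || PySem.Chars.isIn ['#'] value.toList
        || PySem.Chars.isIn ['"'] value.toList) = false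
    · simp [hq]
    · simp only [hq, Bool.not_eq_false] at *
      simp [pvReplace_single, pvEsc_compose]
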